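-- pv_equiv track=rewrite | github.com/doyshinda/aoc | 2019/advent.py | _calc_fuel_with_fuel
-- ===== SOURCE A (Python) =====
-- def _calc_fuel(weight):
--     return (weight // 3) - 2
--
-- def _calc_fuel_with_fuel(mass):
--     total_fuel = _calc_fuel(mass)
--     init_fuel = total_fuel
--     remain = _calc_fuel(init_fuel)
--     while remain > 0:
--         total_fuel += remain
--         remain = _calc_fuel(remain)
--
--     return total_fuel
-- ===== SOURCE B (Python) =====
-- def _calc_fuel(weight):
--     return (weight // 3) - 2
--
--
-- def _chain(f):
--     """List of the successive positive fuel-for-fuel terms starting at f."""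
--     if f <= 0:
--         return []
--     return [f] + _chain(_calc_fuel(f))
--
--
-- def _calc_fuel_with_fuel(mass):
--     base = _calc_fuel(mass)
--     return base + sum(_chain(_calc_fuel(base)))
-- ===== Notes on version B (the rewrite author's own statement) =====
-- stated objective: alternative
-- what changed: Replaces A's while-loop with mutable accumulators by two staged passes: a recursive _chain builds the list of successive positive fuel-for-fuel terms, which is then summed and added to the unconditional base fuel.
import Mathlib
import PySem

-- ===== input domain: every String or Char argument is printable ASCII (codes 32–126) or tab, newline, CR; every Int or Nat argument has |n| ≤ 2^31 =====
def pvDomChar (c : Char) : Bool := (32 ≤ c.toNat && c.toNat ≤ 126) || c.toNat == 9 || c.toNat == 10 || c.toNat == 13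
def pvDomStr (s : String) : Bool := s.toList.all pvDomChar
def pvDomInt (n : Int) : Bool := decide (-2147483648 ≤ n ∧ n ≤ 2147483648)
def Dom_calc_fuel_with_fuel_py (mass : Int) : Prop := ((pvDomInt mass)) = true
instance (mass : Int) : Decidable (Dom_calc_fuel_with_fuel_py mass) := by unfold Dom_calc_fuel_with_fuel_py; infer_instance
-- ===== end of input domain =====

-- B replaces A's while-loop accumulator by two staged passes: build the list of positive fuel-for-fuel terms, then sum it (alternative decomposition, same cost).

-- ===== PORT A =====
-- _calc_fuel(weight) = (weight // 3) - 2
def pvCalcFuelA (weight : Int) : Int := PySem.Int.floordiv weight 3 - 2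

-- the while-loop of A: state (total_fuel, remain)
def pvLoopA (total_fuel remain : Int) : Int :=
  if _h : remain > 0 then pvLoopA (total_fuel + remain) (pvCalcFuelA remain)
  else total_fuel
termination_by remain.toNat
decreasing_by
  simp only [pvCalcFuelA, PySem.Int.floordiv_eq_ediv_of_pos (by norm_num : (0:Int) < 3)]
  omega

def calc_fuel_with_fuel_py (mass : Int) : Int :=
  let total_fuel := pvCalcFuelA mass
  let init_fuel := total_fuel
  let remain := pvCalcFuelA init_fuel
  pvLoopA total_fuel remain

-- ===== PORT B =====
def pvCalcFuelB (weight : Int) : Int := PySem.Int.floordiv weight 3 - 2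

-- _chain(f): list of the successive positive fuel-for-fuel terms starting at f
def pvChainB (f : Int) : List Int :=
  if _h : f ≤ 0 then []
  else [f] ++ pvChainB (pvCalcFuelB f)
termination_by f.toNat
decreasing_by
  simp only [pvCalcFuelB, PySem.Int.floordiv_eq_ediv_of_pos (by norm_num : (0:Int) < 3)]
  omega

def calc_fuel_with_fuel_py_alt (mass : Int) : Int :=
  let base := pvCalcFuelB mass
  base + (pvChainB (pvCalcFuelB base)).sum

-- ===== PRECONDITION & SPEC =====
def Spec_calc_fuel_with_fuel_py (mass : Int) (out : Int) : Prop := out = calc_fuel_with_fuel_py_alt mass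
instance (mass : Int) (out : Int) : Decidable (Spec_calc_fuel_with_fuel_py mass out) := by unfold Spec_calc_fuel_with_fuel_py; infer_instance

-- ===== CLAIM (what is proved, stated in full; the proofs are below) =====
def Claim_equal_calc_fuel_with_fuel_py : Prop := ∀ (mass : Int), Dom_calc_fuel_with_fuel_py mass → Spec_calc_fuel_with_fuel_py mass (calc_fuel_with_fuel_py mass)

-- ===== LEMMAS AND PROOFS =====
theorem pvLoopA_eq_chain_sum (r : Int) : ∀ total : Int, pvLoopA total r = total + (pvChainB r).sum := by
  induction r using pvChainB.induct with
  | case1 r h =>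
    intro total
    rw [pvLoopA, pvChainB]
    simp [h, show ¬ r > 0 by omega]
  | case2 r h ih =>
    intro total
    rw [pvLoopA, pvChainB]
    have hb : pvCalcFuelA r = pvCalcFuelB r := rfl
    simp only [show r > 0 by omega, dif_pos, dif_neg h, hb, List.sum_append, List.sum_cons,
      List.sum_nil]
    rw [ih]
    ring

-- ===== VERDICT =====
theorem calc_fuel_with_fuel_py_spec : Claim_equal_calc_fuel_with_fuel_py := by
  intro mass _
  unfold Spec_calc_fuel_with_fuel_py calc_fuel_with_fuel_py calc_fuel_with_fuel_py_alt
  exact pvLoopA_eq_chain_sum _ _
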